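-- pv_equiv track=rewrite | github.com/DA-testa/parallel-processing-er4ella | main.py | parallel_processing
-- ===== SOURCE A (Python) =====
-- def parallel_processing(n, m, data):
--     output = []
--     thr = [(0, i) for i in range (n)]
--
--     for i in range(m):
--         start, thri = thr.pop(0)
--         output.append((thri, start))
--         end = start + data[i]
--         thr.append((end, thri))
--         thr.sort()
--
--     return output
-- ===== SOURCE B (Python) =====
-- def parallel_processing(n, m, data):
--     # simpler: keep only each thread's next-free time; pick the earliest
--     # (ties -> lowest index) by min + index instead of re-sorting a pair list
--     ends = [0] * n
--     output = []
--     for i in range(m):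
--         start = min(ends)
--         j = ends.index(start)
--         output.append((j, start))
--         ends[j] = start + data[i]
--     return output
-- ===== Notes on version B (the rewrite author's own statement) =====
-- stated objective: simpler
-- what changed: B replaces A's sorted list of (time, thread) pairs that is popped, appended and re-sorted every iteration by a plain per-thread next-free-time list from which the earliest thread is picked with min + index, so no pair list and no sorting remain.
-- outside the precondition, e.g. on parallel_processing(2, 3, [1]): A raises IndexError, B raises IndexError; on parallel_processing(0, 2, [1, 2]): A raises IndexError, B raises ValueError
import Mathlib
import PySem

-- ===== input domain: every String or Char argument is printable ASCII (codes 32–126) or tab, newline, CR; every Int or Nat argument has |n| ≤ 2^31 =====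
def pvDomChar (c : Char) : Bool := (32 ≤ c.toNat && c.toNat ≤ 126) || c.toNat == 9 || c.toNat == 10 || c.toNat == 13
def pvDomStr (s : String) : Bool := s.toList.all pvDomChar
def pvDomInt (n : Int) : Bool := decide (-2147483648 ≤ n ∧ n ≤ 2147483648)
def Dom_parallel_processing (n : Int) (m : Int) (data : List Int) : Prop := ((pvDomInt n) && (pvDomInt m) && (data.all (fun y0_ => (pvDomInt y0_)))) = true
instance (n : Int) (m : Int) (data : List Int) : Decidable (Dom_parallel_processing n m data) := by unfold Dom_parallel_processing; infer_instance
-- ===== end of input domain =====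

-- B keeps one next-free time per thread and picks the earliest (min + index) instead of
-- re-sorting a list of (time, thread) pairs each turn; objective: simpler.

-- ===== PORT A =====
-- one pass of A's loop body: pop thr[0], record, push (end, thread), sort (Python tuple sort = lex)
def ppStepA (data : List Int) (st : List (Int × Int) × List (Int × Int)) (i : Int) :
    List (Int × Int) × List (Int × Int) :=
  match st.2 with
  | [] => st        -- Python raises IndexError on thr.pop(0) here; excluded by Pre_
  | (start, thri) :: rest =>
    (st.1 ++ [(thri, start)],
     PySem.List.sorted2 (rest ++ [(start + PySem.List.pyGetD data i 0, thri)])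
       (fun p => p.1) (fun p => p.2))

def parallel_processing (n : Int) (m : Int) (data : List Int) : List (Int × Int) :=
  ((PySem.List.pyRange 0 m 1).foldl (ppStepA data)
    ([], (PySem.List.pyRange 0 n 1).map (fun i => ((0 : Int), i)))).1

-- ===== PORT B =====
-- one pass of B's loop body: start = min(ends); j = ends.index(start); record; ends[j] = start + data[i]
def ppStepB (data : List Int) (st : List (Int × Int) × List Int) (i : Int) :
    List (Int × Int) × List Int :=
  match PySem.List.min? st.2 (fun x => x) with
  | none => st      -- Python raises ValueError on min([]) here; excluded by Pre_
  | some start =>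
    let j : Nat := (PySem.List.index? st.2 start).getD 0
    (st.1 ++ [((j : Int), start)],
     PySem.List.pySetD st.2 (j : Int) (start + PySem.List.pyGetD data i 0))

def parallel_processing_alt (n : Int) (m : Int) (data : List Int) : List (Int × Int) :=
  ((PySem.List.pyRange 0 m 1).foldl (ppStepB data)
    ([], PySem.List.pyRepeat [(0 : Int)] n)).1

-- ===== PRECONDITION & SPEC =====
-- Pre_ excludes exactly the inputs where A raises: m > len(data) (IndexError on data[i])
-- and 0 < m with n ≤ 0 (pop from the empty thread list).
def Pre_parallel_processing (n : Int) (m : Int) (data : List Int) : Prop :=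
  m ≤ (data.length : Int) ∧ (0 < m → 0 < n)
instance (n : Int) (m : Int) (data : List Int) : Decidable (Pre_parallel_processing n m data) := by
  unfold Pre_parallel_processing; infer_instance

def pvWitness_parallel_processing : Int × Int × List Int := (2, 3, [1, 2, 3])

def Spec_parallel_processing (n : Int) (m : Int) (data : List Int) (out : List (Int × Int)) : Prop :=
  out = parallel_processing_alt n m data
instance (n : Int) (m : Int) (data : List Int) (out : List (Int × Int)) :
    Decidable (Spec_parallel_processing n m data out) := by
  unfold Spec_parallel_processing; infer_instance

-- ===== CLAIM (what is proved, stated in full; the proofs are below) =====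
def Claim_equal_parallel_processing : Prop :=
  ∀ (n : Int) (m : Int) (data : List Int), Dom_parallel_processing n m data →
    Pre_parallel_processing n m data →
    Spec_parallel_processing n m data (parallel_processing n m data)

-- ===== LEMMAS AND PROOFS =====

-- [(ends[0], 0), (ends[1], 1), …]: the (time, thread) view of B's state
def efL (ends : List Int) : List (Int × Int) :=
  (PySem.List.enumerate ends 0).map (fun p => (p.2, p.1))

theorem efL_length (ends : List Int) : (efL ends).length = ends.length := by
  simp [efL, PySem.List.length_enumerate]

theorem efL_getElem (ends : List Int) (k : Nat) (h : k < (efL ends).length) :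
    (efL ends)[k] = (ends[k]'(by simpa [efL_length] using h), (k : Int)) := by
  simp [efL, PySem.List.getElem_enumerate]

theorem mem_efL (ends : List Int) (p : Int × Int) :
    p ∈ efL ends ↔ ∃ k, ∃ (h : k < ends.length), p = (ends[k], (k : Int)) := by
  simp only [efL, List.mem_map, PySem.List.mem_enumerate_iff]
  constructor
  · rintro ⟨q, ⟨k, hk, rfl⟩, rfl⟩; exact ⟨k, hk, by simp⟩
  · rintro ⟨k, hk, rfl⟩; exact ⟨((k : Int), ends[k]), ⟨k, hk, by simp⟩, rfl⟩

theorem efL_snd_nodup (ends : List Int) : ((efL ends).map (·.2)).Nodup := by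
  have h := PySem.List.pairwise_lt_enumerate ends 0
  have h2 : List.Pairwise (fun p q : Int × Int => p.2 ≠ q.2) (efL ends) :=
    (List.pairwise_map.2 (h.imp (fun hpq => ne_of_lt hpq)))
  exact (List.pairwise_map).2 (h2.imp (fun h => h))

theorem efL_toLex_nodup (ends : List Int) : ((efL ends).map (fun p => toLex p)).Nodup := by
  have h1 : (efL ends).Nodup := (efL_snd_nodup ends).of_map _
  exact h1.map toLex.injective

theorem efL_set (ends : List Int) (k : Nat) (v : Int) :
    efL (ends.set k v) = (efL ends).set k (v, (k : Int)) := by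
  apply List.ext_getElem
  · simp [efL_length]
  · intro j h1 h2
    have hj : j < ends.length := by simpa [efL_length] using h1
    by_cases hjk : j = k
    · subst hjk
      rw [efL_getElem, List.getElem_set]
      simp [hj]
    · rw [efL_getElem, List.getElem_set]
      simp [efL_getElem, Ne.symm hjk]

-- Python's tuple sort on (Int, Int) pairs is the sort by the lexicographic key
theorem sorted2_eq_sorted_toLex (xs : List (Int × Int)) :
    PySem.List.sorted2 xs (fun p => p.1) (fun p => p.2) =
    PySem.List.sorted xs (fun p => toLex p) := by
  rw [PySem.List.sorted_eq_foldl_insertBy]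
  unfold PySem.List.sorted2
  simp only [if_neg (by decide : ¬ (false = true))]
  congr 1
  funext acc x
  congr 1
  funext a b
  rw [Bool.eq_iff_iff]
  have hl : (toLex a < toLex b) ↔ (a.1 < b.1 ∨ a.1 = b.1 ∧ a.2 < b.2) := Prod.Lex.lt_iff
  simp only [Bool.or_eq_true, Bool.and_eq_true, Bool.not_eq_eq_eq_not, Bool.not_true,
    decide_eq_true_eq, decide_eq_false_iff_not, hl]
  omega

-- a stable sort of lists with pairwise-distinct keys depends only on the multiset
theorem sorted_toLex_eq_of_perm (xs ys : List (Int × Int))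
    (hnd : ((ys.map (fun p => toLex p)).Nodup)) (hp : xs.Perm ys) :
    PySem.List.sorted xs (fun p => toLex p) = PySem.List.sorted ys (fun p => toLex p) := by
  apply PySem.List.sorted_eq_of_perm_of_pairwise_lt
  · exact (PySem.List.sorted_perm ys (fun p => toLex p) false).trans hp.symm
  · have hle := PySem.List.sorted_pairwise ys (fun p => toLex p)
    have hperm : ((PySem.List.sorted ys (fun p => toLex p) false).map (fun p => toLex p)).Perm
        (ys.map (fun p => toLex p)) := (PySem.List.sorted_perm ys _ false).map _
    have hnd' := hnd.perm hperm.symm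
    have hne : List.Pairwise (fun a b : Int × Int => toLex a ≠ toLex b)
        (PySem.List.sorted ys (fun p => toLex p)) := List.pairwise_map.1 hnd'
    exact (hle.and hne).imp (fun ⟨h1, h2⟩ => lt_of_le_of_ne h1 h2)

theorem ppStepB_length (data : List Int) (st : List (Int × Int) × List Int) (i : Int) :
    (ppStepB data st i).2.length = st.2.length := by
  unfold ppStepB
  cases h : PySem.List.min? st.2 (fun x => x) with
  | none => rfl
  | some start => simp

-- ONE step of A on the sorted (time, thread) view equals one step of B on the times
theorem step_sim (data : List Int) (i : Int) (out : List (Int × Int)) (ends : List Int)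
    (hne : ends ≠ []) :
    ppStepA data (out, PySem.List.sorted (efL ends) (fun p => toLex p)) i =
    ((ppStepB data (out, ends) i).1,
     PySem.List.sorted (efL (ppStepB data (out, ends) i).2) (fun p => toLex p)) := by
  -- B's min exists
  obtain ⟨mv, hmv⟩ : ∃ mv, PySem.List.min? ends (fun x => x) = some mv := by
    cases h : PySem.List.min? ends (fun x => x) with
    | none => exact absurd ((PySem.List.min?_eq_none_iff ends _).1 h) hne
    | some mv => exact ⟨mv, rfl⟩
  have hmv_mem : mv ∈ ends := PySem.List.min?_mem hmv
  have hmv_min : ∀ y ∈ ends, mv ≤ y := PySem.List.min?_isMin hmv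
  -- B's index exists: j0, the first position of mv
  obtain ⟨j0, hj0⟩ : ∃ j0, List.idxOf? mv ends = some j0 := by
    cases h : List.idxOf? mv ends with
    | none => exact absurd (List.idxOf?_eq_none_iff.1 h) (by simpa using hmv_mem)
    | some j => exact ⟨j, rfl⟩
  obtain ⟨hj0lt, hj0v, hj0first⟩ := List.idxOf?_eq_some_iff.1 hj0
  -- the sorted view is nonempty
  set s := PySem.List.sorted (efL ends) (fun p => toLex p) with hs_def
  have hsne : s ≠ [] := by
    rw [hs_def, Ne, PySem.List.sorted_eq_nil_iff]
    intro h
    have hl := efL_length ends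
    rw [h] at hl
    exact hne (List.eq_nil_of_length_eq_zero hl.symm)
  obtain ⟨hd, t, hst⟩ := List.exists_cons_of_ne_nil hsne
  -- hd is ≤ (lex) every element of efL ends
  have hd_le : ∀ y ∈ efL ends, toLex hd ≤ toLex y := by
    intro y hy
    have hy' : y ∈ s := (PySem.List.mem_sorted _ _ _ _).2 hy
    rw [hst, List.mem_cons] at hy'
    rcases hy' with rfl | hy'
    · exact le_refl _
    · have hpw := PySem.List.sorted_pairwise (efL ends) (fun p => toLex p)
      rw [← hs_def, hst, List.pairwise_cons] at hpw
      exact hpw.1 y hy'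
  -- hd ∈ efL ends, so hd = (ends[k0], k0)
  have hd_mem : hd ∈ efL ends := by
    have hmem : hd ∈ s := by rw [hst]; exact List.mem_cons_self
    exact (PySem.List.mem_sorted _ _ _ _).1 hmem
  obtain ⟨k0, hk0, hdk0⟩ := (mem_efL ends hd).1 hd_mem
  -- hd.1 = mv
  obtain ⟨km, hkm, hkmv⟩ := List.mem_iff_getElem.1 hmv_mem
  have h1 : hd.1 = mv := by
    have hylex := hd_le (ends[km], (km : Int)) ((mem_efL ends _).2 ⟨km, hkm, rfl⟩)
    have hle1 : hd.1 ≤ ends[km] := by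
      rcases Prod.Lex.le_iff.1 hylex with h | ⟨h, _⟩
      · simp only [ofLex_toLex] at h; exact le_of_lt h
      · simp only [ofLex_toLex] at h; exact le_of_eq h
    have hge : mv ≤ hd.1 := by
      rw [hdk0]; exact hmv_min _ (List.getElem_mem hk0)
    rw [hkmv] at hle1
    omega
  -- k0 = j0: the head's thread index is the first index attaining the minimum
  have hk0j : k0 = j0 := by
    have hj0k0 : j0 ≤ k0 := by
      by_contra hlt
      rw [not_le] at hlt
      exact hj0first k0 hlt (by rw [hdk0] at h1; simpa using h1)
    have hk0j0 : k0 ≤ j0 := by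
      have hmem' : ((ends[j0], (j0 : Int)) : Int × Int) ∈ efL ends :=
        (mem_efL ends _).2 ⟨j0, hj0lt, rfl⟩
      have hlex := hd_le _ hmem'
      rcases Prod.Lex.le_iff.1 hlex with h | ⟨_, h2⟩
      · exfalso; simp only [ofLex_toLex] at h; rw [h1, hj0v] at h; exact lt_irrefl _ h
      · simp only [ofLex_toLex] at h2
        rw [hdk0] at h2
        exact Nat.cast_le.mp (by simpa using h2)
    omega
  subst hk0j
  have hhd : hd = (mv, (k0 : Int)) := by
    rw [hdk0, hj0v]
  -- evaluate B's step
  have hB : ppStepB data (out, ends) i =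
      (out ++ [((k0 : Int), mv)], ends.set k0 (mv + PySem.List.pyGetD data i 0)) := by
    unfold ppStepB
    rw [show (out, ends).2 = ends from rfl, hmv]
    simp only [PySem.List.index?_eq_idxOf?, hj0, Option.getD_some]
    rw [PySem.List.pySetD_natCast]
  -- evaluate A's step
  have hA : ppStepA data (out, s) i =
      (out ++ [((k0 : Int), mv)],
       PySem.List.sorted2 (t ++ [(mv + PySem.List.pyGetD data i 0, (k0 : Int))])
         (fun p => p.1) (fun p => p.2)) := by
    rw [hst, hhd]
    rfl
  rw [hA, hB]
  refine Prod.ext rfl ?_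
  simp only
  rw [sorted2_eq_sorted_toLex]
  -- remains: sorted (t ++ [new]) = sorted (efL (ends.set k0 (mv+d)))
  set d := PySem.List.pyGetD data i 0 with hd_def
  have hj0' : k0 < (efL ends).length := by rw [efL_length]; exact hj0lt
  have hdrop : (efL ends).drop k0 = ((mv, (k0 : Int)) : Int × Int) :: (efL ends).drop (k0 + 1) := by
    have h := (List.getElem_cons_drop hj0').symm
    rw [efL_getElem, hj0v] at h
    exact h
  have hsplit : efL ends =
      (efL ends).take k0 ++ ((mv, (k0 : Int)) : Int × Int) :: (efL ends).drop (k0 + 1) := by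
    calc efL ends = (efL ends).take k0 ++ (efL ends).drop k0 := (List.take_append_drop _ _).symm
      _ = (efL ends).take k0 ++ ((mv, (k0 : Int)) : Int × Int) :: (efL ends).drop (k0 + 1) := by
          rw [hdrop]
  have ht_perm : t.Perm ((efL ends).take k0 ++ (efL ends).drop (k0 + 1)) := by
    have hsp : s.Perm (efL ends) := PySem.List.sorted_perm _ _ _
    rw [hst, hhd] at hsp
    have hsp2 : ((mv, (k0 : Int)) :: t).Perm
        ((efL ends).take k0 ++ ((mv, (k0 : Int)) : Int × Int) :: (efL ends).drop (k0 + 1)) :=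
      hsplit ▸ hsp
    exact (hsp2.trans List.perm_middle).cons_inv
  have hset : efL (ends.set k0 (mv + d)) =
      (efL ends).take k0 ++ ((mv + d, (k0 : Int)) : Int × Int) :: (efL ends).drop (k0 + 1) := by
    rw [efL_set, List.set_eq_take_append_cons_drop, if_pos hj0']
  apply sorted_toLex_eq_of_perm
  · exact efL_toLex_nodup _
  · rw [hset]
    exact ((ht_perm.append_right _).trans (List.perm_append_singleton _ _)).trans
      List.perm_middle.symm

-- the whole loop: A on the sorted view tracks B on the times
theorem loop_sim (data : List Int) (steps : List Int) :
    ∀ (out : List (Int × Int)) (ends : List Int), ends ≠ [] →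
    steps.foldl (ppStepA data) (out, PySem.List.sorted (efL ends) (fun p => toLex p)) =
    ((steps.foldl (ppStepB data) (out, ends)).1,
     PySem.List.sorted (efL ((steps.foldl (ppStepB data) (out, ends)).2)) (fun p => toLex p)) := by
  induction steps with
  | nil => intro out ends _; rfl
  | cons i rest ih =>
    intro out ends hne
    rw [List.foldl_cons, List.foldl_cons, step_sim data i out ends hne]
    have hne' : (ppStepB data (out, ends) i).2 ≠ [] := by
      intro h
      have := ppStepB_length data (out, ends) i
      rw [h] at this
      exact hne (List.eq_nil_of_length_eq_zero this.symm)
    have := ih (ppStepB data (out, ends) i).1 (ppStepB data (out, ends) i).2 hne'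
    rw [show ((ppStepB data (out, ends) i).1, (ppStepB data (out, ends) i).2) =
      ppStepB data (out, ends) i from rfl] at this
    rw [this]

-- A's initial thread list is the sorted view of B's initial times
theorem init_eq (n : Int) :
    (PySem.List.pyRange 0 n 1).map (fun i => ((0 : Int), i)) =
    PySem.List.sorted (efL (List.replicate n.toNat 0)) (fun p => toLex p) := by
  have hpw : List.Pairwise (fun a b : Int × Int => toLex a ≤ toLex b)
      (efL (List.replicate n.toNat 0)) := by
    rw [List.pairwise_iff_getElem]
    intro a b ha hb hab
    rw [efL_getElem, efL_getElem]
    have hla : a < n.toNat := by simpa [efL_length] using ha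
    have hlb : b < n.toNat := by simpa [efL_length] using hb
    rw [Prod.Lex.le_iff]
    right
    refine ⟨by simp, ?_⟩
    simp only [ofLex_toLex]
    exact_mod_cast le_of_lt hab
  rw [PySem.List.sorted_eq_self_of_pairwise _ _ hpw]
  apply List.ext_getElem
  · simp [efL_length, PySem.List.length_pyRange_one]
  · intro k h1 h2
    have hk : k < n.toNat := by simpa [efL_length] using h2
    rw [List.getElem_map, efL_getElem, PySem.List.getElem_pyRange_one]
    simp

-- ===== VERDICT (by name: the statement is the Claim_ definition above) =====
theorem parallel_processing_spec : Claim_equal_parallel_processing := by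
  intro n m data _ hpre
  unfold Spec_parallel_processing parallel_processing parallel_processing_alt
  by_cases hm : 0 < m
  · have hn : 0 < n := hpre.2 hm
    have hrep : PySem.List.pyRepeat [(0 : Int)] n = List.replicate n.toNat 0 :=
      PySem.List.pyRepeat_singleton 0 n
    have hne : List.replicate n.toNat 0 ≠ ([] : List Int) := by
      intro h
      have hl := congrArg List.length h
      simp at hl
      omega
    rw [hrep, init_eq n, loop_sim data (PySem.List.pyRange 0 m 1) [] _ hne]
  · have hnil : PySem.List.pyRange 0 m 1 = [] := by
      apply PySem.List.pyRange_one_eq_nil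
      omega
    rw [hnil]
    rfl
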